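-- pv_equiv track=rewrite | github.com/Chasonnnn/agi | projects/contextshift-deid/scripts/annotate_candidate_pool.py | _mask_to_labels
-- ===== SOURCE A (Python) =====
-- def _mask_to_labels(mask: list[bool]) -> list[str]:
--     labels: list[str] = []
--     previous = False
--     for current in mask:
--         if not current:
--             labels.append("O")
--         elif previous:
--             labels.append("I-SUSPECT")
--         else:
--             labels.append("B-SUSPECT")
--         previous = current
--     return labels
-- ===== SOURCE B (Python) =====
-- def _mask_to_labels(mask: list[bool]) -> list[str]:
--     labels: list[str] = []
--     i = 0
--     n = len(mask)
--     while i < n: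
--         j = i
--         while j < n and mask[j] == mask[i]:
--             j += 1
--         run = j - i
--         if mask[i]:
--             labels.append("B-SUSPECT")
--             labels.extend(["I-SUSPECT"] * (run - 1))
--         else:
--             labels.extend(["O"] * run)
--         i = j
--     return labels
-- ===== Notes on version B (the rewrite author's own statement) =====
-- stated objective: alternative
-- what changed: Replaced the previous-flag state machine with a run-length decomposition: the mask is split into maximal constant runs and each run is emitted wholesale (B-SUSPECT plus I-SUSPECT repeats for a True run, O repeats for a False run).
import Mathlib
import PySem

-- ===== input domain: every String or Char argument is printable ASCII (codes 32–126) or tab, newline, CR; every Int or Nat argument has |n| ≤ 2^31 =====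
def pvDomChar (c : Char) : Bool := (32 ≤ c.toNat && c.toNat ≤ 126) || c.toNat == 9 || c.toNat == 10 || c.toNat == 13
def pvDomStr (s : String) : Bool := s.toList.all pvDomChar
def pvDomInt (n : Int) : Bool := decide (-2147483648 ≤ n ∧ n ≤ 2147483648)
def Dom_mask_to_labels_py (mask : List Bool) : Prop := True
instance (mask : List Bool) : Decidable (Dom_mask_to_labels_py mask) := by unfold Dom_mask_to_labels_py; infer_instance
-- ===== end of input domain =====

-- B replaces A's previous-flag state machine with a run-length decomposition of the mask (same O(n) cost; objective: alternative structure).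


-- ===== PORT A =====
def mask_to_labels_py (mask : List Bool) : List String :=
  (mask.foldl
    (fun (st : List String × Bool) current =>
      (st.1 ++ [if current = false then "O" else if st.2 then "I-SUSPECT" else "B-SUSPECT"],
       current))
    ([], false)).1

-- ===== PORT B =====
-- B: run-length decomposition; the inner while computing a run boundary is ported as takeWhile/dropWhile
def pvAltGo (l : List Bool) : List String :=
  match l with
  | [] => []
  | b :: rest =>
    let run := rest.takeWhile (· == b)
    let rest' := rest.dropWhile (· == b)
    (if b then "B-SUSPECT" :: List.replicate run.length "I-SUSPECT"
     else List.replicate (run.length + 1) "O") ++ pvAltGo rest'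
termination_by l.length
decreasing_by
  have := List.length_dropWhile_le (· == b) rest
  simp
  omega

def mask_to_labels_py_alt (mask : List Bool) : List String := pvAltGo mask

-- ===== PRECONDITION & SPEC =====
def Spec_mask_to_labels_py (mask : List Bool) (out : List String) : Prop := out = mask_to_labels_py_alt mask
instance (mask : List Bool) (out : List String) : Decidable (Spec_mask_to_labels_py mask out) := by unfold Spec_mask_to_labels_py; infer_instance

-- ===== CLAIM (what is proved, stated in full; the proofs are below) =====
def Claim_equal_mask_to_labels_py : Prop := ∀ (mask : List Bool), Dom_mask_to_labels_py mask → Spec_mask_to_labels_py mask (mask_to_labels_py mask)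

-- ===== LEMMAS AND PROOFS =====

-- ===== VERDICT (by name: the statement is the Claim_ definition above) =====
-- state-machine recursion equivalent to A's fold
def pvGoA (prev : Bool) : List Bool → List String
  | [] => []
  | c :: rest =>
    (if c = false then "O" else if prev then "I-SUSPECT" else "B-SUSPECT") :: pvGoA c rest

theorem pvFoldl_goA (l : List Bool) (acc : List String) (prev : Bool) :
    (l.foldl
      (fun (st : List String × Bool) current =>
        (st.1 ++ [if current = false then "O" else if st.2 then "I-SUSPECT" else "B-SUSPECT"],
         current))
      (acc, prev)).1 = acc ++ pvGoA prev l := by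
  induction l generalizing acc prev with
  | nil => simp [pvGoA]
  | cons c rest ih => simp [List.foldl, pvGoA, ih]

theorem pvAltGo_false (rest : List Bool) : pvAltGo (false :: rest) = "O" :: pvAltGo rest := by
  cases rest with
  | nil => simp [pvAltGo]
  | cons b r =>
    cases b with
    | false =>
      rw [pvAltGo, pvAltGo]
      simp [List.takeWhile, List.dropWhile, List.replicate_succ]
    | true =>
      rw [pvAltGo]
      simp [List.takeWhile, List.dropWhile, List.replicate_succ]

theorem pvGoA_altGo (l : List Bool) :
    (pvGoA false l = pvAltGo l) ∧
    (pvGoA true l =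
      List.replicate (l.takeWhile (· == true)).length "I-SUSPECT" ++
        pvAltGo (l.dropWhile (· == true))) := by
  induction l with
  | nil => simp [pvGoA, pvAltGo]
  | cons c rest ih =>
    cases c with
    | false =>
      refine ⟨?_, ?_⟩
      · rw [pvGoA, pvAltGo_false, ih.1]; simp
      · rw [pvGoA, ih.1]
        simp [List.takeWhile, List.dropWhile, pvAltGo_false]
    | true =>
      refine ⟨?_, ?_⟩
      · rw [pvGoA, pvAltGo, ih.2]
        simp
      · rw [pvGoA, ih.2]
        simp [List.takeWhile, List.dropWhile, List.replicate_succ]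

theorem mask_to_labels_py_spec : Claim_equal_mask_to_labels_py := by
  intro mask _
  unfold Spec_mask_to_labels_py mask_to_labels_py mask_to_labels_py_alt
  rw [pvFoldl_goA, (pvGoA_altGo mask).1]
  simp
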